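-- pv_equiv track=rewrite | github.com/x6nux/zed-globalization | src/zedl10n/replace.py | _check_placeholders
-- ===== SOURCE A (Python) =====
-- def _is_positional(ph: str) -> bool:
--     """判断占位符是否按位置绑定参数。
--
--     位置绑定（顺序敏感）：{}, {:?}, {:.2}, %s, %d 等
--     命名/索引（顺序无关）：{name}, {0}, {name:?} 等
--     """
--     if ph.startswith("%"):
--         return True
--     inner = ph[1:-1]  # 去掉 { }
--     return inner == "" or inner.startswith(":")
--
-- def _check_placeholders(src: list[str], dst: list[str]) -> bool:
--     """校验占位符兼容性。
--
--     - 位置绑定占位符（{}, {:?} 等）：顺序必须严格一致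
--     - 命名/索引占位符（{name}, {0} 等）：只需集合一致，顺序随意
--     """
--     src_pos = [p for p in src if _is_positional(p)]
--     dst_pos = [p for p in dst if _is_positional(p)]
--     if src_pos != dst_pos:
--         return False
--     src_named = sorted(p for p in src if not _is_positional(p))
--     dst_named = sorted(p for p in dst if not _is_positional(p))
--     return src_named == dst_named
-- ===== SOURCE B (Python) =====
-- def _is_positional(ph: str) -> bool:
--     if ph.startswith("%"):
--         return True
--     inner = ph[1:-1]
--     return inner == "" or inner.startswith(":")
--
-- def _check_placeholders(src: list[str], dst: list[str]) -> bool: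
--     # One pass per list: collect positionals in order, and keep a single signed
--     # frequency table for named placeholders (+1 for src, -1 for dst).
--     src_pos = []
--     counts = {}
--     for p in src:
--         if _is_positional(p):
--             src_pos.append(p)
--         else:
--             counts[p] = counts.get(p, 0) + 1
--     dst_pos = []
--     for p in dst:
--         if _is_positional(p):
--             dst_pos.append(p)
--         else:
--             counts[p] = counts.get(p, 0) - 1
--     return src_pos == dst_pos and all(v == 0 for v in counts.values())
-- ===== Notes on version B (the rewrite author's own statement) =====
-- stated objective: alternative
-- what changed: The named-placeholder multiset test sorted(src_named)==sorted(dst_named) is replaced by a single signed frequency table (+1 on src, -1 on dst, all counts must end at 0), built in the same pass that partitions each list; the positional order-sensitive list comparison is kept.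
import Mathlib
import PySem

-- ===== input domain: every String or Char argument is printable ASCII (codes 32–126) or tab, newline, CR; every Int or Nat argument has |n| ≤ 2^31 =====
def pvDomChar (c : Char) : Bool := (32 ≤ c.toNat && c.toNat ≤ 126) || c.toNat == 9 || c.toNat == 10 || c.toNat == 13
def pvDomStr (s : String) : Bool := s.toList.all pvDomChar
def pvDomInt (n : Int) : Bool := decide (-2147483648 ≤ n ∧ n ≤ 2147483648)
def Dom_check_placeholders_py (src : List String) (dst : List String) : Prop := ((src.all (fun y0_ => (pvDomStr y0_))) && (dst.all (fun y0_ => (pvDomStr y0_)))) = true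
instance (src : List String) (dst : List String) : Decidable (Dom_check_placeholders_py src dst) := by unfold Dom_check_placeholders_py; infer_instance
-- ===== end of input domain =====

-- B replaces the sort-based named-placeholder multiset comparison by a single signed
-- frequency table built while partitioning each list once (alternative decomposition).


-- ===== PORT A =====
-- _is_positional, shared helper of both Pythons
def pvIsPositional (ph : String) : Bool :=
  if PySem.Str.startswith ph "%" then true
  else
    let inner := PySem.Str.slice ph (some 1) (some (-1))
    inner == "" || PySem.Str.startswith inner ":"

def check_placeholders_py (src : List String) (dst : List String) : Bool :=
  let src_pos := src.filter (fun p => pvIsPositional p)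
  let dst_pos := dst.filter (fun p => pvIsPositional p)
  if src_pos ≠ dst_pos then false
  else
    let src_named := PySem.List.sorted (src.filter (fun p => !pvIsPositional p)) (fun x => x)
    let dst_named := PySem.List.sorted (dst.filter (fun p => !pvIsPositional p)) (fun x => x)
    src_named == dst_named

-- ===== PORT B =====
def check_placeholders_py_alt (src : List String) (dst : List String) : Bool :=
  let s := src.foldl
    (fun (acc : List String × PySem.Dict String Int) p =>
      if pvIsPositional p then (acc.1 ++ [p], acc.2)
      else (acc.1, acc.2.insert p (acc.2.getD p 0 + 1)))
    (([] : List String), (PySem.Dict.empty : PySem.Dict String Int))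
  let t := dst.foldl
    (fun (acc : List String × PySem.Dict String Int) p =>
      if pvIsPositional p then (acc.1 ++ [p], acc.2)
      else (acc.1, acc.2.insert p (acc.2.getD p 0 - 1)))
    (([] : List String), s.2)
  s.1 == t.1 && t.2.values.all (fun v => v == 0)

-- ===== PRECONDITION & SPEC =====
def Spec_check_placeholders_py (src : List String) (dst : List String) (out : Bool) : Prop := out = check_placeholders_py_alt src dst
instance (src : List String) (dst : List String) (out : Bool) : Decidable (Spec_check_placeholders_py src dst out) := by unfold Spec_check_placeholders_py; infer_instance

-- ===== CLAIM (what is proved, stated in full; the proofs are below) =====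
def Claim_equal_check_placeholders_py : Prop := ∀ (src : List String) (dst : List String), Dom_check_placeholders_py src dst → Spec_check_placeholders_py src dst (check_placeholders_py src dst)

-- ===== LEMMAS AND PROOFS =====

-- the decrement loop of B subtracts the count of each element
theorem pv_getD_foldl_insert_sub_one (l : List String) (d : PySem.Dict String Int) (v : String) :
    (l.foldl (fun d x => d.insert x (d.getD x 0 - 1)) d).getD v 0 = d.getD v 0 - (l.count v : Int) := by
  induction l generalizing d with
  | nil => simp
  | cons x xs ih =>
      simp only [List.foldl_cons, ih, PySem.Dict.getD_insert]
      by_cases h : v = x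
      · subst h; simp; ring
      · have h' : ¬ x = v := fun e => h e.symm
        simp [h, h']

-- B's pair-fold splits into the positional filter and the counter fold
theorem pv_fold_split (l : List String) (acc : List String) (d : PySem.Dict String Int)
    (f : PySem.Dict String Int → String → Int) :
    l.foldl
      (fun (acc : List String × PySem.Dict String Int) p =>
        if pvIsPositional p then (acc.1 ++ [p], acc.2)
        else (acc.1, acc.2.insert p (f acc.2 p)))
      (acc, d)
    = (acc ++ l.filter (fun p => pvIsPositional p),
       (l.filter (fun p => !pvIsPositional p)).foldl (fun d x => d.insert x (f d x)) d) := by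
  have hfun :
      (fun (acc : List String × PySem.Dict String Int) p =>
        if pvIsPositional p then (acc.1 ++ [p], acc.2)
        else (acc.1, acc.2.insert p (f acc.2 p)))
      = fun (s : List String × PySem.Dict String Int) e =>
          ((fun a p => if pvIsPositional p then a ++ [p] else a) s.1 e,
           (fun d p => if pvIsPositional p then d else PySem.Dict.insert d p (f d p)) s.2 e) := by
    funext s e; by_cases h : pvIsPositional e <;> simp [h]
  rw [hfun, PySem.List.foldl_prod_mk
        (f := fun a p => if pvIsPositional p then a ++ [p] else a)
        (g := fun d p => if pvIsPositional p then d else PySem.Dict.insert d p (f d p)),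
      PySem.List.foldl_append_if_eq_filter]
  have hfun2 :
      (fun (d : PySem.Dict String Int) p => if pvIsPositional p then d else d.insert p (f d p))
      = fun d p => if !pvIsPositional p then d.insert p (f d p) else d := by
    funext d p; by_cases h : pvIsPositional p <;> simp [h]
  rw [hfun2, PySem.List.foldl_if_eq_foldl_filter]

theorem check_placeholders_eq (src : List String) (dst : List String) :
    check_placeholders_py src dst = check_placeholders_py_alt src dst := by
  unfold check_placeholders_py check_placeholders_py_alt
  have hsplit_src := pv_fold_split src [] PySem.Dict.empty (fun d p => d.getD p 0 + 1)
  have hsplit_dst := pv_fold_split dst [] (PySem.Dict.counter (src.filter (fun p => !pvIsPositional p)))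
      (fun d p => d.getD p 0 - 1)
  simp only [List.nil_append] at hsplit_src hsplit_dst
  rw [hsplit_src]
  simp only [PySem.Dict.foldl_insert_getD_add_one_eq_counter]
  rw [hsplit_dst]
  set sN := src.filter (fun p => !pvIsPositional p) with hsN
  set dN := dst.filter (fun p => !pvIsPositional p) with hdN
  set d2 := dN.foldl (fun d x => d.insert x (d.getD x 0 - 1)) (PySem.Dict.counter sN) with hd2
  have hgetD : ∀ v, d2.getD v 0 = (sN.count v : Int) - (dN.count v : Int) := by
    intro v
    rw [hd2, pv_getD_foldl_insert_sub_one, PySem.Dict.getD_counter]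
  have hkeys : d2.keys = PySem.Set.update (PySem.Set.ofList sN) dN := by
    rw [hd2, PySem.Dict.keys_foldl_insert, PySem.Dict.keys_counter]
  have hnd : d2.keys.Nodup := by
    rw [hd2]
    exact PySem.Dict.nodup_keys_foldl_insert _ _ _
      (by rw [PySem.Dict.keys_counter]; exact PySem.Set.nodup_ofList _)
  -- all table entries are zero exactly when the two named lists are permutations
  have key_iff : (∀ k ∈ d2.keys, d2.getD k 0 = 0) ↔ sN.Perm dN := by
    constructor
    · intro h
      rw [List.perm_iff_count]
      intro a
      by_cases hm : a ∈ d2.keys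
      · have := h a hm; rw [hgetD] at this; omega
      · rw [hkeys] at hm
        simp only [PySem.Set.mem_update, PySem.Set.mem_ofList] at hm
        push Not at hm
        rw [List.count_eq_zero_of_not_mem hm.1, List.count_eq_zero_of_not_mem hm.2]
    · intro hperm k _
      rw [hgetD]
      have := List.perm_iff_count.mp hperm k
      omega
  have hvals : (d2.values.all (fun v => v == 0)) = decide (sN.Perm dN) := by
    rw [PySem.Dict.values_eq_map_keys d2 hnd 0, List.all_map]
    by_cases hp : sN.Perm dN
    · simp only [hp, decide_true]
      rw [List.all_eq_true]
      intro k hk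
      simpa using key_iff.mpr hp k hk
    · simp only [hp, decide_false]
      have hne : ¬ ∀ k ∈ d2.keys, d2.getD k 0 = 0 := fun h => hp (key_iff.mp h)
      push Not at hne
      obtain ⟨k, hk, hkne⟩ := hne
      rw [List.all_eq_false]
      exact ⟨k, hk, by simpa using hkne⟩
  rw [hvals]
  by_cases hpos : src.filter (fun p => pvIsPositional p) = dst.filter (fun p => pvIsPositional p)
  · simp only [hpos, ne_eq, not_true_eq_false, if_false, beq_self_eq_true, Bool.true_and]
    by_cases hp : sN.Perm dN
    · simp [hp, (PySem.List.sorted_id_eq_sorted_id_iff_perm sN dN).mpr hp]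
    · have hs : PySem.List.sorted sN (fun x => x) ≠ PySem.List.sorted dN (fun x => x) :=
        fun e => hp ((PySem.List.sorted_id_eq_sorted_id_iff_perm _ _).mp e)
      simp [hp, hs]
  · simp [hpos]

-- ===== VERDICT (by name: the statement is the Claim_ definition above) =====
theorem check_placeholders_py_spec : Claim_equal_check_placeholders_py := by
  intro src dst _
  unfold Spec_check_placeholders_py
  exact check_placeholders_eq src dst
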